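-- pv_equiv track=rewrite | github.com/edimarzo/parcial-tecnicas-programacion | ejercicio2.py | batallaDeBotes
-- ===== SOURCE A (Python) =====
-- def mapaCheck(mapa):
--     """Recibe una lista de listas (mapa) y evalua si cumple con las condiciones del juego.
--     Devuelve el mapa verificado y en caso de error devuelve una lista vacía."""
--
--     if largoCheck(mapa)=="error":
--         return "error"
--     if caracteresCheck(mapa)=="error":
--         return "error"
--     return mapa
--
-- def largoCheck(mapa):
--     """Recibe el mapa y verifica si cada una de las listas cuenta con la misma cantidad de caracteres.
--     Devuelve el mapa verificado."""
--
--     if mapa == "" or mapa == []: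
--         return "error"
--     a = len(mapa[0])
--     for x in mapa:
--         if len(x) != a:
--             return "error"
--         else:
--             continue
--     return mapa
--
-- def caracteresCheck(mapa):
--     """Recibe el mapa y verifica que los caracteres sean sólo "b" y "."
--     Devuelve el mapa verificado o el mensaje error en caso de no cumplirse las condicionnes."""
--     for x in mapa:
--         for y in x:
--             if y =="b" or y==".":
--                 continue
--             else:
--                 return "error"
--     return mapa
--
-- def coordenadasMapa(mapa):
--     """Recibe el mapa y genera un listado de "coordenadas" donde se ubican los barcos."""
--     cuentax=0
--     listacoordenadas = []
--     for x in mapa: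
--         cuentax = cuentax + 1
--         cuentay=0
--         for y in x:
--             cuentay = cuentay + 1
--             if y =="b":
--                 cord=(cuentax,cuentay)
--                 listacoordenadas.append(cord)
--     return listacoordenadas
--
-- def batallaDeBotes(mapa,tiros):
--     """Recibe el mapa y las "coordenadas" que representan los disparos.
--     Devuelve las coordenadas de los barcos que no fueron hundidos."""
--     mapavacio = []
--     if mapaCheck(mapa)=="error":
--         return mapavacio
--     lista = coordenadasMapa(mapa)
--     for x in tiros:
--         for y in lista:
--             if x == y:
--                 lista.remove(y)
--             else:
--                 continue
--     return lista
-- ===== SOURCE B (Python) =====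
-- def batallaDeBotes(mapa, tiros):
--     """Single pass over the grid: validate row length and characters while
--     collecting surviving ship coordinates, using a set of shots."""
--     if mapa == "" or mapa == []:
--         return []
--     ref = len(mapa[0])
--     tiros_set = set(tiros)
--     res = []
--     i = 0
--     for fila in mapa:
--         i += 1
--         if len(fila) != ref:
--             return []
--         j = 0
--         for c in fila:
--             j += 1
--             if c != 'b' and c != '.':
--                 return []
--             if c == 'b' and (i, j) not in tiros_set:
--                 res.append((i, j))
--     return res
-- ===== Notes on version B (the rewrite author's own statement) =====
-- stated objective: alternative
-- what changed: A's four separate passes (length check, character check, full coordinate listing, then quadratic removal of shots via repeated list.remove) are fused into one traversal of the grid that validates each row and cell on the fly and appends a ship coordinate only when it is not in a precomputed set of shots.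
import Mathlib
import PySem

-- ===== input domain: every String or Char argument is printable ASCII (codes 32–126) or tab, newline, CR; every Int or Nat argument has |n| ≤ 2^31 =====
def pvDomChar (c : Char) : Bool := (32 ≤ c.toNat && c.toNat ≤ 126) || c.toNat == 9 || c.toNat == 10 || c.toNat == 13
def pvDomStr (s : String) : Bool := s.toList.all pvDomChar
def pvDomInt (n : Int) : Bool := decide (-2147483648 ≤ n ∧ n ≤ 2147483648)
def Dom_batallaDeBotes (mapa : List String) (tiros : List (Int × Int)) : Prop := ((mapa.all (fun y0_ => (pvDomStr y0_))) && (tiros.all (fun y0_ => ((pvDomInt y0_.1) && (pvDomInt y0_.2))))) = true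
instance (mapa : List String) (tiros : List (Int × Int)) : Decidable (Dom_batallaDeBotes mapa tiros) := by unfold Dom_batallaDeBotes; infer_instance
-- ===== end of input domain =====

-- B fuses A's four passes (length check, character check, coordinate listing, shot removal)
-- into a single traversal of the grid with a set of shots; return values agree on all inputs.

-- ===== PORT A =====

-- largoCheck: returns true iff the Python helper returns "error"
-- (mapa == "" is impossible for a List String argument, so only the [] case remains).
def largoCheckErr (mapa : List String) : Bool :=
  match mapa with
  | [] => true
  | x :: _ => mapa.any (fun r => PySem.Str.len r ≠ PySem.Str.len x)

-- caracteresCheck: returns true iff the Python helper returns "error"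
def caracteresCheckErr (mapa : List String) : Bool :=
  mapa.any (fun x => x.toList.any (fun y => ¬(y = 'b' ∨ y = '.')))

-- mapaCheck: true iff the Python helper returns "error"
def mapaCheckErr (mapa : List String) : Bool :=
  if largoCheckErr mapa then true
  else if caracteresCheckErr mapa then true
  else false

-- coordenadasMapa: same two nested loops with the cuentax/cuentay counters and append
def coordenadasMapa (mapa : List String) : List (Int × Int) :=
  (mapa.foldl
    (fun (st : Int × List (Int × Int)) x =>
      let cuentax := st.1 + 1
      let inner := x.toList.foldl
        (fun (st2 : Int × List (Int × Int)) y =>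
          let cuentay := st2.1 + 1
          (cuentay, if y = 'b' then st2.2 ++ [(cuentax, cuentay)] else st2.2))
        (0, st.2)
      (cuentax, inner.2))
    (0, [])).2

-- CPython 'for y in lista: if x == y: lista.remove(y)' iterates by index over the
-- mutating list; lista.remove(y) with y = lista[i] removes the first occurrence of y,
-- which is exactly List.erase (hand port, exact for the == of pairs of ints).
-- The Nat fuel only bounds the index walk (len - i shrinks every step); it never
-- runs out before the loop's own exit test i < len fails.
def pyForRemoveGo (x : Int × Int) : Nat → List (Int × Int) → Nat → List (Int × Int)
  | 0, lista, _ => lista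
  | n + 1, lista, i =>
    if h : i < lista.length then
      if x = lista[i] then pyForRemoveGo x n (lista.erase lista[i]) (i + 1)
      else pyForRemoveGo x n lista (i + 1)
    else lista

def pyForRemove (x : Int × Int) (lista : List (Int × Int)) : List (Int × Int) :=
  pyForRemoveGo x lista.length lista 0

def batallaDeBotes (mapa : List String) (tiros : List (Int × Int)) : List (Int × Int) :=
  if mapaCheckErr mapa then []
  else tiros.foldl (fun lista x => pyForRemove x lista) (coordenadasMapa mapa)

-- ===== PORT B =====

-- inner loop of Source B over the characters of one row (j is the 1-based column counter);
-- none = the early 'return []' on a bad character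
def altCellsGo (tset : List (Int × Int)) (i : Int) :
    Int → List Char → List (Int × Int) → Option (List (Int × Int))
  | _, [], acc => some acc
  | j, c :: cs, acc =>
    let j' := j + 1
    if ¬(c = 'b') ∧ ¬(c = '.') then none
    else altCellsGo tset i j' cs
      (if c = 'b' ∧ ¬((i, j') ∈ tset) then acc ++ [(i, j')] else acc)

-- outer loop of Source B over the rows (i is the 1-based row counter);
-- none = the early 'return []' on a row of the wrong length or a bad character
def altRows (tset : List (Int × Int)) (ref : Int) :
    Int → List String → List (Int × Int) → Option (List (Int × Int))
  | _, [], acc => some acc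
  | i, fila :: rest, acc =>
    let i' := i + 1
    if PySem.Str.len fila ≠ ref then none
    else match altCellsGo tset i' 0 fila.toList acc with
      | none => none
      | some acc' => altRows tset ref i' rest acc'

def batallaDeBotes_alt (mapa : List String) (tiros : List (Int × Int)) : List (Int × Int) :=
  match mapa with
  | [] => []
  | f0 :: _ =>
    let ref := PySem.Str.len f0
    let tset := PySem.Set.ofList tiros
    (altRows tset ref 0 mapa []).getD []

-- ===== PRECONDITION & SPEC =====
def Spec_batallaDeBotes (mapa : List String) (tiros : List (Int × Int)) (out : List (Int × Int)) : Prop := out = batallaDeBotes_alt mapa tiros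
instance (mapa : List String) (tiros : List (Int × Int)) (out : List (Int × Int)) : Decidable (Spec_batallaDeBotes mapa tiros out) := by unfold Spec_batallaDeBotes; infer_instance

-- ===== CLAIM (what is proved, stated in full; the proofs are below) =====
def Claim_equal_batallaDeBotes : Prop := ∀ (mapa : List String) (tiros : List (Int × Int)), Dom_batallaDeBotes mapa tiros → Spec_batallaDeBotes mapa tiros (batallaDeBotes mapa tiros)

-- ===== LEMMAS AND PROOFS =====

-- spec-side description of the surviving coordinates ------------------------

def goodc (c : Char) : Bool := decide (c = 'b' ∨ c = '.')

def rowB (i : Int) : Int → List Char → List (Int × Int)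
  | _, [] => []
  | j, c :: cs => (if c = 'b' then [(i, j + 1)] else []) ++ rowB i (j + 1) cs

def mapC : Int → List String → List (Int × Int)
  | _, [] => []
  | i, f :: fs => rowB (i + 1) 0 f.toList ++ mapC (i + 1) fs

-- A side: the two nested foldl's of coordenadasMapa compute mapC ------------

lemma inner_fold (i : Int) (cs : List Char) : ∀ (j : Int) (acc : List (Int × Int)),
    cs.foldl (fun (st2 : Int × List (Int × Int)) y =>
      (st2.1 + 1, if y = 'b' then st2.2 ++ [(i, st2.1 + 1)] else st2.2)) (j, acc)
      = (j + cs.length, acc ++ rowB i j cs) := by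
  induction cs with
  | nil => intro j acc; simp [rowB]
  | cons c cs ih =>
    intro j acc
    simp only [List.foldl_cons]
    rw [ih]
    refine Prod.ext ?_ ?_
    · simp; omega
    · simp [rowB]; split_ifs <;> simp

lemma outer_fold (rows : List String) : ∀ (i : Int) (acc : List (Int × Int)),
    rows.foldl (fun (st : Int × List (Int × Int)) x =>
      (st.1 + 1, (x.toList.foldl (fun (st2 : Int × List (Int × Int)) y =>
        (st2.1 + 1, if y = 'b' then st2.2 ++ [(st.1 + 1, st2.1 + 1)] else st2.2))
        (0, st.2)).2)) (i, acc)
      = (i + rows.length, acc ++ mapC i rows) := by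
  induction rows with
  | nil => intro i acc; simp [mapC]
  | cons f fs ih =>
    intro i acc
    simp only [List.foldl_cons]
    rw [inner_fold (i + 1)]
    rw [ih]
    refine Prod.ext ?_ ?_
    · simp; omega
    · simp [mapC]

lemma coordenadas_eq (mapa : List String) : coordenadasMapa mapa = mapC 0 mapa := by
  have h := congrArg Prod.snd (outer_fold mapa 0 [])
  simpa [coordenadasMapa] using h

-- nodup of the coordinate list ----------------------------------------------

lemma rowB_mem (i : Int) (cs : List Char) : ∀ (j : Int) (p : Int × Int),
    p ∈ rowB i j cs → p.1 = i ∧ j < p.2 := by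
  induction cs with
  | nil => intro j p hp; simp [rowB] at hp
  | cons c cs ih =>
    intro j p hp
    simp only [rowB, List.mem_append] at hp
    rcases hp with hp | hp
    · by_cases hb : c = 'b'
      · rw [if_pos hb] at hp
        simp only [List.mem_singleton] at hp
        subst hp
        exact ⟨rfl, by show j < j + 1; omega⟩
      · rw [if_neg hb] at hp
        simp at hp
    · have := ih (j + 1) p hp
      exact ⟨this.1, by omega⟩

lemma rowB_nodup (i : Int) (cs : List Char) : ∀ (j : Int), (rowB i j cs).Nodup := by
  induction cs with
  | nil => intro j; simp [rowB]
  | cons c cs ih =>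
    intro j
    simp only [rowB]
    split
    · simp only [List.singleton_append, List.nodup_cons]
      refine ⟨fun hm => ?_, ih (j + 1)⟩
      have h2 := (rowB_mem i cs (j + 1) _ hm).2
      simp at h2
    · simpa using ih (j + 1)

lemma mapC_mem (rows : List String) : ∀ (i : Int) (p : Int × Int),
    p ∈ mapC i rows → i < p.1 := by
  induction rows with
  | nil => intro i p hp; simp [mapC] at hp
  | cons f fs ih =>
    intro i p hp
    simp only [mapC, List.mem_append] at hp
    rcases hp with hp | hp
    · have := rowB_mem (i + 1) f.toList 0 p hp; omega
    · have := ih (i + 1) p hp; omega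

lemma mapC_nodup (rows : List String) : ∀ (i : Int), (mapC i rows).Nodup := by
  induction rows with
  | nil => intro i; simp [mapC]
  | cons f fs ih =>
    intro i
    simp only [mapC]
    refine List.Nodup.append (rowB_nodup _ _ _) (ih (i + 1)) ?_
    intro p hp hq
    have h1 := rowB_mem (i + 1) f.toList 0 p hp
    have h2 := mapC_mem fs (i + 1) p hq
    omega

-- A side: the removal loop is erase, and folding erase is filter ------------

lemma pyForRemoveGo_erase (x : Int × Int) : ∀ (n : Nat) (l : List (Int × Int)) (i : Nat),
    l.length ≤ i + n → l.Nodup → x ∉ l.take i → pyForRemoveGo x n l i = l.erase x := by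
  intro n
  induction n with
  | zero =>
    intro l i hle hnd hx
    simp only [pyForRemoveGo]
    rw [List.take_of_length_le (by omega)] at hx
    exact (List.erase_of_not_mem hx).symm
  | succ n ih =>
    intro l i hle hnd hx
    simp only [pyForRemoveGo]
    split
    · rename_i h
      by_cases hxy : x = l[i]
      · rw [if_pos hxy]
        have hxl : x ∉ l.erase l[i] := by subst hxy; exact hnd.not_mem_erase
        have hlen := List.length_erase_of_mem (List.getElem_mem h) (a := l[i])
        rw [ih _ _ (by omega) (hnd.erase _) (fun hm => hxl (List.mem_of_mem_take hm))]
        subst hxy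
        exact List.erase_of_not_mem hxl
      · rw [if_neg hxy]
        refine ih _ _ (by omega) hnd (fun hm => ?_)
        rw [List.take_add_one] at hm
        rcases List.mem_append.mp hm with hm | hm
        · exact hx hm
        · rw [List.getElem?_eq_getElem h] at hm
          simp only [Option.toList_some, List.mem_singleton] at hm
          exact hxy hm
    · rename_i h
      rw [List.take_of_length_le (by omega)] at hx
      exact (List.erase_of_not_mem hx).symm

lemma pyForRemove_erase (x : Int × Int) (l : List (Int × Int)) (hnd : l.Nodup) :
    pyForRemove x l = l.erase x :=
  pyForRemoveGo_erase x l.length l 0 (by omega) hnd (by simp)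

lemma foldl_pyForRemove (ts : List (Int × Int)) : ∀ (l : List (Int × Int)), l.Nodup →
    ts.foldl (fun lista x => pyForRemove x lista) l
      = ts.foldl (fun acc x => acc.erase x) l := by
  induction ts with
  | nil => intro l _; rfl
  | cons t ts ih =>
    intro l hnd
    simp only [List.foldl_cons]
    rw [pyForRemove_erase t l hnd]
    exact ih _ (hnd.erase t)

lemma foldl_erase_filter (ts : List (Int × Int)) : ∀ (l : List (Int × Int)), l.Nodup →
    ts.foldl (fun acc x => acc.erase x) l = l.filter (fun y => decide (y ∉ ts)) := by
  induction ts with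
  | nil => intro l _; simp
  | cons t ts ih =>
    intro l hnd
    simp only [List.foldl_cons]
    rw [ih _ (hnd.erase t), hnd.erase_eq_filter]
    simp only [List.filter_filter]
    refine List.filter_congr (fun p _ => ?_)
    by_cases h1 : p = t <;> by_cases h2 : p ∈ ts <;> simp [h1, h2]

-- B side: the fused traversal computes the filtered mapC --------------------

lemma altCellsGo_spec (tset : List (Int × Int)) (i : Int) (cs : List Char) :
    ∀ (j : Int) (acc : List (Int × Int)),
    altCellsGo tset i j cs acc =
      if cs.all goodc then
        some (acc ++ (rowB i j cs).filter (fun p => decide (p ∉ tset)))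
      else none := by
  induction cs with
  | nil => intro j acc; simp [altCellsGo, rowB]
  | cons c cs ih =>
    intro j acc
    simp only [altCellsGo]
    rw [ih]
    by_cases hg : goodc c = true
    · have hgood : ¬(¬(c = 'b') ∧ ¬(c = '.')) := by
        simp only [goodc, decide_eq_true_eq] at hg; tauto
      simp only [if_neg hgood, List.all_cons, hg, Bool.true_and]
      split
      · simp only [rowB, List.filter_append]
        congr 1
        split_ifs with hb hm hm <;> simp_all
      · rfl
    · have hbad : ¬(c = 'b') ∧ ¬(c = '.') := by
        simp only [goodc, decide_eq_true_eq] at hg; tauto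
      simp [hbad, List.all_cons, hg]

lemma altRows_spec (tset : List (Int × Int)) (ref : Int) (rows : List String) :
    ∀ (i : Int) (acc : List (Int × Int)),
    altRows tset ref i rows acc =
      if rows.all (fun r => decide (PySem.Str.len r = ref) && r.toList.all goodc) then
        some (acc ++ (mapC i rows).filter (fun p => decide (p ∉ tset)))
      else none := by
  induction rows with
  | nil => intro i acc; simp [altRows, mapC]
  | cons f fs ih =>
    intro i acc
    simp only [altRows]
    rw [altCellsGo_spec]
    by_cases hlen : PySem.Str.len f = ref
    · have hlenC : (f.length : Int) = ref := by
        rw [← PySem.Str.len_eq_length]; exact hlen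
      rw [if_neg (fun hne => hne hlen)]
      by_cases hchars : f.toList.all goodc = true
      · rw [if_pos hchars]
        change altRows tset ref (i + 1) fs _ = _
        rw [ih]
        simp [List.all_cons, hlenC, hchars, mapC, List.filter_append, List.append_assoc]
      · rw [if_neg hchars]
        have hc : f.toList.all goodc = false := by
          revert hchars; cases f.toList.all goodc <;> simp
        simp [List.all_cons, hc]
    · have hlenC : ¬ ((f.length : Int) = ref) := by
        rw [← PySem.Str.len_eq_length]; exact hlen
      rw [if_pos hlen]
      simp [List.all_cons, hlenC]

-- error conditions agree ----------------------------------------------------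

lemma mapaCheckErr_false_iff (f0 : String) (rest : List String) :
    mapaCheckErr (f0 :: rest) = false ↔
      (f0 :: rest).all
        (fun r => decide (PySem.Str.len r = PySem.Str.len f0) && r.toList.all goodc) = true := by
  constructor
  · intro h
    simp only [mapaCheckErr] at h
    split at h
    · simp at h
    · split at h
      · simp at h
      · rename_i hlargo hcar
        rw [List.all_eq_true]
        intro r hr
        simp only [largoCheckErr, Bool.not_eq_true, List.any_eq_false] at hlargo
        have h1 := hlargo r hr
        simp only [ne_eq, decide_eq_false_iff_not, not_not] at h1
        simp only [caracteresCheckErr, Bool.not_eq_true, List.any_eq_false] at hcar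
        have h2 := hcar r hr
        simp only [Bool.and_eq_true, decide_eq_true_eq, List.all_eq_true]
        refine ⟨h1, fun c hc => ?_⟩
        have h3 := h2 c hc
        simp only [goodc, decide_eq_true_eq]
        simp only [decide_eq_false_iff_not, not_not] at h3
        exact h3
  · intro hP
    rw [List.all_eq_true] at hP
    have h1 : largoCheckErr (f0 :: rest) = false := by
      simp only [largoCheckErr, List.any_eq_false]
      intro r hr
      have h := hP r hr
      simp only [Bool.and_eq_true, decide_eq_true_eq] at h
      have hl : (r.length : Int) = (f0.length : Int) := by
        rw [← PySem.Str.len_eq_length, ← PySem.Str.len_eq_length]; exact h.1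
      simp [Nat.cast_inj.mp hl]
    have h2 : caracteresCheckErr (f0 :: rest) = false := by
      simp only [caracteresCheckErr, List.any_eq_false]
      intro r hr
      have h := hP r hr
      simp only [Bool.and_eq_true, List.all_eq_true] at h
      simp only [Bool.not_eq_true, List.any_eq_false]
      intro c hc
      have h3 := h.2 c hc
      simp only [goodc, decide_eq_true_eq] at h3
      simp [h3]
    simp [mapaCheckErr, h1, h2]

-- ===== VERDICT (by name: the statement is the Claim_ definition above) =====
theorem batallaDeBotes_spec : Claim_equal_batallaDeBotes := by
  intro mapa tiros _
  show batallaDeBotes mapa tiros = batallaDeBotes_alt mapa tiros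
  cases mapa with
  | nil => simp [batallaDeBotes, batallaDeBotes_alt, mapaCheckErr, largoCheckErr]
  | cons f0 rest =>
    simp only [batallaDeBotes, batallaDeBotes_alt]
    rw [altRows_spec]
    by_cases hP : (f0 :: rest).all
        (fun r => decide (PySem.Str.len r = PySem.Str.len f0) && r.toList.all goodc) = true
    · rw [(mapaCheckErr_false_iff f0 rest).mpr hP, if_pos hP]
      simp only [Bool.false_eq_true, if_false, Option.getD_some, List.nil_append]
      rw [coordenadas_eq, foldl_pyForRemove _ _ (mapC_nodup _ 0),
        foldl_erase_filter _ _ (mapC_nodup _ 0)]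
      refine List.filter_congr (fun p _ => ?_)
      simp [PySem.Set.mem_ofList]
    · have hm : mapaCheckErr (f0 :: rest) = true := by
        cases h : mapaCheckErr (f0 :: rest)
        · exact absurd ((mapaCheckErr_false_iff f0 rest).mp h) hP
        · rfl
      rw [hm, if_neg hP]
      simp
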